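-- pv_equiv track=rewrite | github.com/the-crypt-keeper/cascade | app.py | parse_cascade_id
-- ===== SOURCE A (Python) =====
-- from typing import Dict, List, Set, Tuple
--
-- def parse_step_component(component: str) -> Tuple[str, Dict[str, str]]:
--     """Parse a step component into name and parameters"""
--     if ':' in component:
--         name, param_str = component.split(':', 1)
--         params = dict(p.split('=') for p in param_str.split(','))
--         return name, params
--     return component, {}
--
-- def parse_cascade_id(cascade_id: str) -> List[Tuple[str, Dict[str, str]]]:
--     """Split cascade ID into components, handling merge nodes and parameters"""
--     components = []
--     current = ""
--
--     i = 0
--     while i < len(cascade_id):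
--         if cascade_id[i] == '[':
--             # Skip merge nodes
--             merge_end = cascade_id.index(']', i)
--             i = merge_end + 1
--             if i < len(cascade_id) and cascade_id[i] == '/':
--                 i += 1
--         else:
--             if cascade_id[i] == '/':
--                 if current:
--                     components.append(parse_step_component(current))
--                     current = ""
--             else:
--                 current += cascade_id[i]
--             i += 1
--
--     if current:
--         components.append(parse_step_component(current))
--
--     return components
-- ===== SOURCE B (Python) =====
-- from typing import Dict, List, Tuple
--
-- def parse_step_component(component: str) -> Tuple[str, Dict[str, str]]:
--     """Parse a step component into name and parameters"""
--     if ':' in component: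
--         name, param_str = component.split(':', 1)
--         params = dict(p.split('=') for p in param_str.split(','))
--         return name, params
--     return component, {}
--
-- def parse_cascade_id(cascade_id: str) -> List[Tuple[str, Dict[str, str]]]:
--     """Strip merge nodes textually, then split on '/' and parse the segments"""
--     rest = cascade_id
--     while '[' in rest:
--         pre, _, after = rest.partition('[')
--         body, sep, post = after.partition(']')
--         if not sep:
--             raise ValueError("unclosed '[' in cascade id")
--         if post.startswith('/'):
--             post = post[1:]
--         rest = pre + post
--     return [parse_step_component(seg) for seg in rest.split('/') if seg]
-- ===== Notes on version B (the rewrite author's own statement) =====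
-- stated objective: faster
-- what changed: A walks the string char-by-char in an index-driven state machine accumulating each segment with quadratic 'current += ch' string concatenation; B instead textually deletes each '[...]' merge node (plus one following '/') with partition-based slicing and then parses via one split('/') comprehension.
import Mathlib
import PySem

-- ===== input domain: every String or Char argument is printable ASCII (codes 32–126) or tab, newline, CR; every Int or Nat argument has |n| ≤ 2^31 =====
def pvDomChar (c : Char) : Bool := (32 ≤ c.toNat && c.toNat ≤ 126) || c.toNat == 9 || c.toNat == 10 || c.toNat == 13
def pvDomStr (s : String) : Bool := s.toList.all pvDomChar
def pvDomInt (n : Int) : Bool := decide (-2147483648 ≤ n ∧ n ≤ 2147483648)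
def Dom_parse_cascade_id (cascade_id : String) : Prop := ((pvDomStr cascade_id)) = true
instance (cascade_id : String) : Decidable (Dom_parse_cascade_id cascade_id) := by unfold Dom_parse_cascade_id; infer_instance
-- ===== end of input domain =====

-- B rewrites A's char-by-char state machine (quadratic 'current += ch' accumulation) as "strip merge nodes textually, then split on '/'": same return value, measured faster in a timing run.

-- ===== PORT A =====
-- parse_step_component is textually IDENTICAL in Source A and Source B, so both ports share this one transliteration.
def pscL (component : List Char) : String × List (String × String) :=
  if PySem.Chars.isIn [':'] component = true then
    -- component.split(':', 1):
    let name := component.takeWhile (· != ':')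
    let param_str := (component.dropWhile (· != ':')).drop 1
    -- dict(p.split('=') for p in param_str.split(',')):
    let params := (PySem.Chars.splitOn param_str [',']).foldl (fun d p =>
        match PySem.Chars.splitOn p ['='] with
        | [k, v] => d.insert (String.ofList k) (String.ofList v)
        | _ => d  -- Python raises ValueError here (piece without exactly one '='); Pre_ excludes these inputs
      ) (PySem.Dict.empty)
    (String.ofList name, params.items)
  else (String.ofList component, [])

-- A's while loop over the index i, as structural recursion over the remaining characters.
def loopA (cs cur : List Char) (acc : List (String × List (String × String))) :
    List (String × List (String × String)) :=
  match cs with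
  | [] => if cur = [] then acc else acc ++ [pscL cur]
  | c :: rest =>
    if c = '[' then
      match h : rest.dropWhile (· != ']') with
      | [] => acc  -- Python raises ValueError (cascade_id.index(']', i) finds none); Pre_ excludes these inputs
      | _ :: after =>
        loopA (if after.head? = some '/' then after.drop 1 else after) cur acc
    else if c = '/' then
      loopA rest [] (if cur = [] then acc else acc ++ [pscL cur])
    else
      loopA rest (cur ++ [c]) acc
termination_by cs.length
decreasing_by
  · have h1 : (rest.dropWhile (· != ']')).length ≤ rest.length :=
      List.length_dropWhile_le _ _
    rw [h] at h1
    simp only [List.length_cons] at h1 ⊢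
    split <;> (try simp only [List.length_drop]) <;> omega
  · simp only [List.length_cons]; omega
  · simp only [List.length_cons]; omega

def parse_cascade_id (cascade_id : String) : List (String × (List (String × String))) :=
  loopA cascade_id.toList [] []

-- ===== PORT B =====
-- Source B's while loop: repeatedly cut out the first '[...]' block (and one '/' right after it).
def stripLoop (rest : List Char) : List Char :=
  if PySem.Chars.isIn ['['] rest = true then
    -- pre, _, after = rest.partition('[');  body, sep, post = after.partition(']')
    match h : ((rest.dropWhile (· != '[')).drop 1).dropWhile (· != ']') with
    | [] => rest.takeWhile (· != '[')  -- sep == '': Python B raises ValueError; Pre_ excludes these inputs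
    | _ :: post =>
      stripLoop (rest.takeWhile (· != '[') ++
        (if PySem.Chars.startswith post ['/'] = true then post.drop 1 else post))  -- post[1:] = drop 1
  else rest
termination_by rest.length
decreasing_by
  have hdw : rest.dropWhile (· != '[') ≠ [] := by
    intro hnil
    have hmem : '[' ∈ rest :=
      (List.singleton_infix_iff _ _).mp
        ((PySem.Chars.isIn_iff_infix (sub := ['[']) (s := rest)).mp (by assumption))
    have := (List.dropWhile_eq_nil_iff).mp hnil '[' hmem
    simp at this
  have h0 : (rest.takeWhile (· != '[')).length + (rest.dropWhile (· != '[')).length = rest.length := by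
    have := congrArg List.length (List.takeWhile_append_dropWhile (p := (· != '[')) (l := rest))
    rw [List.length_append] at this
    exact this
  have h1 : (((rest.dropWhile (· != '[')).drop 1).dropWhile (· != ']')).length ≤
      ((rest.dropWhile (· != '[')).drop 1).length := List.length_dropWhile_le _ _
  rw [h] at h1
  simp only [List.length_cons, List.length_drop] at h1
  have h3 : 1 ≤ (rest.dropWhile (· != '[')).length := by
    cases hdd : rest.dropWhile (· != '[') with
    | nil => exact absurd hdd hdw
    | cons a t => simp
  split <;> simp only [List.length_append, List.length_drop] <;> omega

def parse_cascade_id_alt (cascade_id : String) : List (String × (List (String × String))) :=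
  ((PySem.Chars.splitOn (stripLoop cascade_id.toList) ['/']).filter (fun seg => !seg.isEmpty)).map pscL

-- ===== PRECONDITION & SPEC =====
-- Declarative helper for Pre_: the cascade id with every '[...]' merge node (and one '/' right
-- after it) removed.  This is neither port's loop: it is a single structural pass with two Bool
-- state flags (inside a bracket block / block just closed), used only to STATE which inputs the
-- ','-pieces condition below is about.
def mergeFreeGo : List Char → Bool → Bool → List Char
  | [], _, _ => []
  | c :: rest, true, _ => if c = ']' then mergeFreeGo rest false true else mergeFreeGo rest true false
  | c :: rest, false, just =>
    if c = '[' then mergeFreeGo rest true false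
    else if just && c = '/' then mergeFreeGo rest false false
    else c :: mergeFreeGo rest false false

def mergeFree (cs : List Char) : List Char := mergeFreeGo cs false false

-- every '[' in cs has a ']' somewhere after it
def okBrackets (cs : List Char) : Bool :=
  cs.tails.all fun ys => ys.head? != some '[' || ys.contains ']'

-- a step segment whose parameter part Python's dict(p.split('=') …) accepts
def wfSeg (seg : List Char) : Bool :=
  !seg.contains ':' ||
    (PySem.Chars.splitOn ((seg.dropWhile (· != ':')).drop 1) [',']).all
      fun p => (PySem.Chars.splitOn p ['=']).length == 2

-- Pre_ excludes exactly the inputs where Python A raises ValueError: an '[' with no later ']'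
-- (cascade_id.index fails), or a step segment whose parameter list has a ','-piece that does not
-- split on '=' into exactly two parts (dict(...) fails). Python B raises on exactly the same inputs.
def Pre_parse_cascade_id (cascade_id : String) : Prop :=
  okBrackets cascade_id.toList = true ∧
  (PySem.Chars.splitOn (mergeFree cascade_id.toList) ['/']).all wfSeg = true
instance (cascade_id : String) : Decidable (Pre_parse_cascade_id cascade_id) := by
  unfold Pre_parse_cascade_id; infer_instance

def pvWitness_parse_cascade_id : String := "a:x=1,y=2/[b/c]/d"

def Spec_parse_cascade_id (cascade_id : String) (out : List (String × (List (String × String)))) : Prop := out = parse_cascade_id_alt cascade_id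
instance (cascade_id : String) (out : List (String × (List (String × String)))) : Decidable (Spec_parse_cascade_id cascade_id out) := by unfold Spec_parse_cascade_id; infer_instance

-- ===== CLAIM (what is proved, stated in full; the proofs are below) =====
def Claim_equal_parse_cascade_id : Prop := ∀ (cascade_id : String), Dom_parse_cascade_id cascade_id → Pre_parse_cascade_id cascade_id → Spec_parse_cascade_id cascade_id (parse_cascade_id cascade_id)

-- ===== LEMMAS AND PROOFS =====

-- structural specification of str.split('/') on the character list
def segs : List Char → List (List Char)
  | [] => [[]]
  | c :: rest => if c = '/' then [] :: segs rest else (segs rest).modifyHead (c :: ·)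

theorem modifyHead_fun_id (l : List (List Char)) : l.modifyHead (fun x => x) = l := by
  cases l <;> simp

theorem splitOn_go_eq (fuel : Nat) :
    ∀ (l cur : List Char) (acc : List (List Char)), l.length ≤ fuel →
      PySem.Chars.splitOn.go ['/'] fuel l cur acc =
        acc.reverse ++ (segs l).modifyHead (cur.reverse ++ ·) := by
  induction fuel with
  | zero =>
    intro l cur acc hl
    have : l = [] := List.length_eq_zero_iff.mp (Nat.le_zero.mp hl)
    subst this
    simp [PySem.Chars.splitOn.go, segs]
  | succ fuel ih =>
    intro l cur acc hl
    cases l with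
    | nil => simp [PySem.Chars.splitOn.go, segs]
    | cons c rest =>
      simp only [PySem.Chars.splitOn.go]
      by_cases hc : c = '/'
      · subst hc
        rw [if_pos (by simp [List.isPrefixOf])]
        rw [ih _ _ _ (by simpa using Nat.lt_succ_iff.mp (by simpa using hl))]
        simp [segs, modifyHead_fun_id]
      · rw [if_neg (by simp [List.isPrefixOf]; exact fun h => hc h.symm)]
        rw [ih _ _ _ (by simpa using Nat.lt_succ_iff.mp (by simpa using hl))]
        simp only [segs, if_neg hc, List.modifyHead_modifyHead]
        have hfun : (fun (x : List Char) => (c :: cur).reverse ++ x) =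
            ((fun x => cur.reverse ++ x) ∘ fun x => c :: x) := by
          funext x
          simp
        rw [hfun]

theorem splitOn_eq_segs (l : List Char) : PySem.Chars.splitOn l ['/'] = segs l := by
  have := splitOn_go_eq (l.length + 1) l [] [] (by omega)
  simpa [PySem.Chars.splitOn, modifyHead_fun_id] using this

def parseSegs (l : List Char) : List (String × (List (String × String))) :=
  ((segs l).filter (fun seg => !seg.isEmpty)).map pscL

theorem segs_no_slash (cur : List Char) (h : '/' ∉ cur) : segs cur = [cur] := by
  induction cur with
  | nil => simp [segs]
  | cons c rest ih =>
    simp only [List.mem_cons, not_or] at h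
    have hc : ¬ c = '/' := fun hh => h.1 hh.symm
    simp [segs, hc, ih h.2]

theorem segs_append_slash (cur l : List Char) (h : '/' ∉ cur) :
    segs (cur ++ '/' :: l) = cur :: segs l := by
  induction cur with
  | nil => simp [segs]
  | cons c rest ih =>
    simp only [List.mem_cons, not_or] at h
    have hc : ¬ c = '/' := fun hh => h.1 hh.symm
    simp [segs, hc, ih h.2]

theorem parseSegs_single (cur : List Char) (h : '/' ∉ cur) :
    parseSegs cur = if cur = [] then [] else [pscL cur] := by
  simp only [parseSegs, segs_no_slash cur h]
  cases cur <;> simp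

theorem parseSegs_slash (cur l : List Char) (h : '/' ∉ cur) :
    parseSegs (cur ++ '/' :: l) =
      (if cur = [] then [] else [pscL cur]) ++ parseSegs l := by
  simp only [parseSegs, segs_append_slash cur l h]
  cases cur <;> simp

theorem ok_suffix {cs ys : List Char} (h : okBrackets cs = true) (hs : ys <:+ cs) :
    okBrackets ys = true := by
  simp only [okBrackets, List.all_eq_true] at h ⊢
  intro t ht
  exact h t ((List.mem_tails _ _).mpr (((List.mem_tails _ _).mp ht).trans hs))

theorem ok_head {c : Char} {rest : List Char} (h : okBrackets (c :: rest) = true)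
    (hc : c = '[') : ']' ∈ rest := by
  subst hc
  simp only [okBrackets, List.all_eq_true] at h
  have h2 := h ('[' :: rest) ((List.mem_tails _ _).mpr (List.suffix_refl _))
  simp only [List.head?_cons, bne_self_eq_false, Bool.false_or, List.contains_eq_mem,
    List.mem_cons, decide_eq_true_eq] at h2
  rcases h2 with h' | h'
  · exact absurd h' (by decide)
  · exact h'

theorem dropWhile_head_false {p : Char → Bool} {l x : List Char} {a : Char}
    (h : l.dropWhile p = a :: x) : p a = false := by
  induction l with
  | nil => simp at h
  | cons b t ih =>
    rw [List.dropWhile_cons] at h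
    by_cases hb : p b
    · rw [if_pos hb] at h; exact ih h
    · rw [if_neg hb] at h
      cases h
      simpa using hb

theorem mergeFreeGo_inside (rest : List Char) :
    mergeFreeGo rest true false =
      (match rest.dropWhile (· != ']') with
        | [] => []
        | _ :: after => mergeFreeGo after false true) := by
  induction rest with
  | nil => simp [mergeFreeGo]
  | cons c r ih =>
    by_cases hc : c = ']'
    · subst hc
      simp [mergeFreeGo, List.dropWhile_cons]
    · rw [List.dropWhile_cons, if_pos (by simpa using hc)]
      rw [mergeFreeGo, if_neg hc]
      exact ih

theorem mergeFreeGo_just (after : List Char) :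
    mergeFreeGo after false true =
      mergeFreeGo (if after.head? = some '/' then after.drop 1 else after) false false := by
  cases after with
  | nil => simp [mergeFreeGo]
  | cons c r =>
    by_cases hs : c = '/'
    · subst hs
      simp [mergeFreeGo]
    · rw [if_neg (by simpa using hs)]
      by_cases hb : c = '['
      · subst hb
        rw [mergeFreeGo, mergeFreeGo]
        norm_num
      · rw [mergeFreeGo, if_neg hb, if_neg (by simp [hs]),
          mergeFreeGo, if_neg hb, if_neg (by simp [hs])]

theorem mergeFree_bracket (rest : List Char) {hd : Char} {after : List Char}
    (heq : rest.dropWhile (· != ']') = hd :: after) :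
    mergeFree ('[' :: rest) =
      mergeFree (if after.head? = some '/' then after.drop 1 else after) := by
  show mergeFreeGo ('[' :: rest) false false = _
  rw [mergeFreeGo]
  norm_num
  rw [mergeFreeGo_inside, heq]
  show mergeFreeGo after false true = _
  rw [mergeFreeGo_just after]
  simp only [List.drop_one]
  rfl

theorem mergeFree_char (rest : List Char) {c : Char} (hb : ¬ c = '[') :
    mergeFree (c :: rest) = c :: mergeFree rest := by
  show mergeFreeGo (c :: rest) false false = _
  rw [mergeFreeGo, if_neg hb, if_neg (by simp)]
  rfl

theorem mergeFree_no_bracket (cs : List Char) (h : '[' ∉ cs) : mergeFree cs = cs := by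
  induction cs with
  | nil => simp [mergeFree, mergeFreeGo]
  | cons c rest ih =>
    simp only [List.mem_cons, not_or] at h
    rw [mergeFree_char rest (fun hh => h.1 hh.symm), ih h.2]

theorem mergeFree_append_no_bracket (pre l : List Char) (h : '[' ∉ pre) :
    mergeFree (pre ++ l) = pre ++ mergeFree l := by
  induction pre with
  | nil => simp
  | cons c rest ih =>
    simp only [List.mem_cons, not_or] at h
    rw [List.cons_append, mergeFree_char _ (fun hh => h.1 hh.symm), ih h.2]
    rfl

theorem ok_append_no_bracket (pre l : List Char) (hp : '[' ∉ pre)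
    (hl : okBrackets l = true) : okBrackets (pre ++ l) = true := by
  induction pre with
  | nil => simpa
  | cons c rest ih =>
    simp only [List.mem_cons, not_or] at hp
    have ih' := ih hp.2
    simp only [okBrackets, List.cons_append, List.tails_cons, List.all_cons,
      Bool.and_eq_true] at ih' ⊢
    refine ⟨?_, ih'⟩
    have hc : c ≠ '[' := fun hh => hp.1 hh.symm
    simp [hc]

theorem suffix_of_dropWhile_cons {p : Char → Bool} {l t : List Char} {a : Char}
    (h : l.dropWhile p = a :: t) : t <:+ l := by
  have h1 : a :: t <:+ l := h ▸ List.dropWhile_suffix p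
  exact (List.suffix_cons a t).trans h1

theorem startswith_slash_iff (post : List Char) :
    PySem.Chars.startswith post ['/'] = true ↔ post.head? = some '/' := by
  rw [PySem.Chars.startswith_iff]
  cases post <;> simp [eq_comm]

theorem not_bracket_of_mem_takeWhile {l : List Char} {x : Char}
    (h : x ∈ l.takeWhile (· != '[')) : x ≠ '[' := by
  have := List.mem_takeWhile_imp h
  simpa using this

-- unfolding equations for the three well-founded definitions
theorem loopA_nil (cur : List Char) (acc : List (String × (List (String × String)))) :
    loopA [] cur acc = if cur = [] then acc else acc ++ [pscL cur] := by
  rw [loopA]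

theorem loopA_bracket (rest cur : List Char) (acc : List (String × (List (String × String))))
    {hd : Char} {after : List Char} (heq : rest.dropWhile (· != ']') = hd :: after) :
    loopA ('[' :: rest) cur acc =
      loopA (if after.head? = some '/' then after.drop 1 else after) cur acc := by
  rw [loopA]
  split
  · split
    · next h2 => rw [heq] at h2; cases h2
    · next h2 =>
      rw [heq] at h2
      cases h2
      rfl
  · next h2 => exact absurd rfl h2

theorem loopA_slash (rest cur : List Char) (acc : List (String × (List (String × String)))) :
    loopA ('/' :: rest) cur acc =
      loopA rest [] (if cur = [] then acc else acc ++ [pscL cur]) := by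
  rw [loopA]
  split
  · next h => exact absurd h (by decide)
  · split
    · rfl
    · next h => exact absurd rfl h

theorem loopA_char (rest cur : List Char) (acc : List (String × (List (String × String))))
    {c : Char} (hb : ¬ c = '[') (hs : ¬ c = '/') :
    loopA (c :: rest) cur acc = loopA rest (cur ++ [c]) acc := by
  rw [loopA, if_neg hb, if_neg hs]

theorem stripLoop_cons (rest : List Char) (hin : PySem.Chars.isIn ['['] rest = true)
    {hd : Char} {post : List Char}
    (heq : ((rest.dropWhile (· != '[')).drop 1).dropWhile (· != ']') = hd :: post) :
    stripLoop rest = stripLoop (rest.takeWhile (· != '[') ++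
      (if PySem.Chars.startswith post ['/'] = true then post.drop 1 else post)) := by
  rw [stripLoop, if_pos hin]
  split
  · next h2 => rw [heq] at h2; cases h2
  · next h2 =>
    rw [heq] at h2
    cases h2
    rfl

theorem mem_of_isIn_bracket {rest : List Char} (hin : PySem.Chars.isIn ['['] rest = true) :
    '[' ∈ rest :=
  (List.singleton_infix_iff _ _).mp ((PySem.Chars.isIn_iff_infix _ _).mp hin)

theorem dropWhile_bracket_cons {rest : List Char} (hmem : '[' ∈ rest) :
    ∃ t, rest.dropWhile (· != '[') = '[' :: t := by
  cases hdd : rest.dropWhile (· != '[') with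
  | nil =>
    exfalso
    have := (List.dropWhile_eq_nil_iff.mp hdd) '[' hmem
    simp at this
  | cons a t =>
    have ha : (a != '[') = false := dropWhile_head_false (p := (· != '[')) hdd
    simp only [bne_eq_false_iff_eq] at ha
    exact ⟨t, by rw [ha]⟩

theorem loopA_eq (cs cur : List Char) (acc : List (String × (List (String × String))))
    (hok : okBrackets cs = true) (hcur : '/' ∉ cur) :
    loopA cs cur acc = acc ++ parseSegs (cur ++ mergeFree cs) := by
  induction cs, cur, acc using loopA.induct with
  | case1 acc =>
    simp [loopA_nil, mergeFree, mergeFreeGo, parseSegs, segs]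
  | case2 cur acc hne =>
    rw [loopA_nil]
    simp only [mergeFree, mergeFreeGo, List.append_nil]
    rw [parseSegs_single cur hcur]
    simp [hne]
  | case3 cur acc rest heq =>
    -- Python A raises here; Pre_ (okBrackets) rules this case out
    exfalso
    have hmem : ']' ∈ rest := ok_head hok rfl
    have := (List.dropWhile_eq_nil_iff.mp heq) ']' hmem
    simp at this
  | case4 cur acc rest hd after heq ih =>
    have hsuf : after <:+ rest := suffix_of_dropWhile_cons heq
    have hnext : (if after.head? = some '/' then after.drop 1 else after) <:+ rest := by
      split
      · exact (List.drop_suffix 1 after).trans hsuf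
      · exact hsuf
    have hok' : okBrackets (if after.head? = some '/' then after.drop 1 else after) = true :=
      ok_suffix hok (hnext.trans (List.suffix_cons '[' rest))
    rw [loopA_bracket rest cur acc heq, mergeFree_bracket rest heq]
    simp only [dite_eq_ite, List.drop_one] at ih
    simp only [List.drop_one] at hok' ⊢
    exact ih hok' hcur
  | case5 cur acc rest hne ih =>
    have hok' : okBrackets rest = true := ok_suffix hok (List.suffix_cons '/' rest)
    rw [loopA_slash rest cur acc, mergeFree_char rest hne]
    simp only [dite_eq_ite] at ih
    have hih := ih hok' (by simp)
    simp only [List.nil_append] at hih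
    rw [hih, parseSegs_slash cur (mergeFree rest) hcur]
    split <;> simp
  | case6 cur acc c rest hb hs ih =>
    have hok' : okBrackets rest = true := ok_suffix hok (List.suffix_cons c rest)
    have hcur' : '/' ∉ cur ++ [c] := by
      simp only [List.mem_append, List.mem_singleton, not_or]
      exact ⟨hcur, fun hh => hs hh.symm⟩
    rw [loopA_char rest cur acc hb hs, mergeFree_char rest hb]
    rw [ih hok' hcur']
    simp

theorem stripLoop_eq (cs : List Char) (hok : okBrackets cs = true) :
    stripLoop cs = mergeFree cs := by
  induction cs using stripLoop.induct with
  | case2 rest hin hd post heq ih =>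
    obtain ⟨t, hd1⟩ := dropWhile_bracket_cons (mem_of_isIn_bracket hin)
    have hrest : rest.takeWhile (· != '[') ++ '[' :: t = rest := by
      conv_rhs => rw [← List.takeWhile_append_dropWhile (p := (· != '[')) (l := rest)]
      rw [hd1]
    have heqt : t.dropWhile (· != ']') = hd :: post := by
      rw [hd1] at heq
      simpa using heq
    have hpre : '[' ∉ rest.takeWhile (· != '[') := fun hmem =>
      not_bracket_of_mem_takeWhile hmem rfl
    have htsuf : t <:+ rest := by
      have : '[' :: t <:+ rest := hd1 ▸ List.dropWhile_suffix _
      exact (List.suffix_cons '[' t).trans this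
    have hpostsuf : post <:+ t := suffix_of_dropWhile_cons heqt
    have hnextsuf : (if PySem.Chars.startswith post ['/'] = true then post.drop 1 else post) <:+ rest := by
      split
      · exact ((List.drop_suffix 1 post).trans hpostsuf).trans htsuf
      · exact hpostsuf.trans htsuf
    have hoknext : okBrackets (if PySem.Chars.startswith post ['/'] = true then post.drop 1 else post) = true :=
      ok_suffix hok hnextsuf
    have hokpre : okBrackets (rest.takeWhile (· != '[') ++
        (if PySem.Chars.startswith post ['/'] = true then post.drop 1 else post)) = true :=
      ok_append_no_bracket _ _ hpre hoknext
    simp only [dite_eq_ite] at ih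
    rw [stripLoop_cons rest hin heq, ih hokpre]
    rw [mergeFree_append_no_bracket _ _ hpre]
    conv_rhs => rw [← hrest]
    rw [mergeFree_append_no_bracket _ _ hpre]
    congr 1
    rw [mergeFree_bracket t heqt]
    by_cases hsw : post.head? = some '/'
    · rw [if_pos hsw, if_pos ((startswith_slash_iff post).mpr hsw)]
    · rw [if_neg hsw, if_neg (fun hh => hsw ((startswith_slash_iff post).mp hh))]
  | case1 rest hin heq =>
    -- Python B raises here; Pre_ (okBrackets) rules this case out
    exfalso
    obtain ⟨t, hd1⟩ := dropWhile_bracket_cons (mem_of_isIn_bracket hin)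
    have hokt : okBrackets ('[' :: t) = true :=
      ok_suffix hok (hd1 ▸ List.dropWhile_suffix _)
    have hmem : ']' ∈ t := ok_head hokt rfl
    rw [hd1] at heq
    simp only [List.drop_one, List.tail_cons] at heq
    have := (List.dropWhile_eq_nil_iff.mp heq) ']' hmem
    simp at this
  | case3 rest hin =>
    have hnb : '[' ∉ rest := by
      intro hmem
      have : PySem.Chars.isIn ['['] rest = true :=
        (PySem.Chars.isIn_iff_infix _ _).mpr ((List.singleton_infix_iff _ _).mpr hmem)
      exact hin (by simp [this])
    rw [stripLoop, if_neg (by simp [hin] : ¬ PySem.Chars.isIn ['['] rest = true)]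
    rw [mergeFree_no_bracket rest hnb]

-- ===== VERDICT (by name: the statement is the Claim_ definition above) =====
theorem parse_cascade_id_spec : Claim_equal_parse_cascade_id := by
  intro cascade_id _ hpre
  unfold Spec_parse_cascade_id parse_cascade_id parse_cascade_id_alt
  rw [stripLoop_eq _ hpre.1, splitOn_eq_segs,
    loopA_eq _ [] [] hpre.1 (by simp)]
  simp [parseSegs]
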